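-- pv_equiv track=rewrite | github.com/Syedirtiza768/realtrackapp | scripts/phased_analyzer_v3.py | classify_cluster
-- ===== SOURCE A (Python) =====
-- SIGNALS = {
--     "Entity Table – Product/Part Catalog":
--         {"sku","title","brand","price","upc","mpn","description","item_name",
--          "product_name","condition","category","manufacturer_part_number",
--          "part_number","item_sku","custom_label","ebay_title","quantity",
--          "oem_number","parts_description","part_title","additional_details",
--          "oem","real_price"},
--     "Export Format – eBay Listing Template":
--         {"action","site_id","format","duration","start_price","buy_it_now_price",
--          "listing_type","listing_duration","ebay_category","ebay_item_id",
--          "listing_status","item_id","dont_change_this","general_instructions",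
--          "shippingpolicynames","returnpolicynames","paymentpolicynames"},
--     "Reference Lookup – Category Mapping":
--         {"category_id","category_name","header","mandatory","values"},
--     "Reference Lookup – eBay Item Aspects":
--         {"c_brand","c_manufacturer_part_number","c_placement_on_vehicle",
--          "c_fitment_type","c_warranty","c_type","c_material",
--          "c_surface_finish","c_color"},
--     "Relational Mapping – Vehicle Fitment":
--         {"make","model","year","engine","submodel","trim","fitment",
--          "vehicle","compatibility","maker"},
--     "Media Mapping – Image/URL heavy":
--         {"image_url","picurl","pic_url","image","photo","gallery_url",
--          "picture_url","image_count","folder_link",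
--          "image_links_one_per_column_f_g_h","exists_in_drive"},
--     "Inventory Snapshot – SKU + Quantity":
--         {"quantity","location","warehouse","stock","bin","qty",
--          "available_quantity","q"},
--     "Metadata / Instructions Sheet":
--         {"info","created","indicates_missing_required_fields",
--          "indicates_missing_field_that_will_be_required_soon",
--          "fitment_parts_accessories_help"},
--     "Condition Descriptors Reference":
--         {"condition_descriptor","conditiondescriptors"},
-- }
--
-- def classify_cluster(union_cols):
--     cols = set(c.lower() for c in union_cols)
--     evidence = []
--     scores = {}
--     for label, sig in SIGNALS.items():
--         hits = cols & sig
--         if hits: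
--             scores[label] = (len(hits), hits)
--             evidence.append(f"{label}: matched {sorted(hits)}")
--     if not scores:
--         return "Unknown – insufficient signals", 20, ["No strong column matches"]
--     best = max(scores, key=lambda k: scores[k][0])
--     hit_count = scores[best][0]
--     max_sig = max(len(s) for s in SIGNALS.values())
--     conf = min(95, int(hit_count / max_sig * 100) + 40)
--     return best, conf, evidence
-- ===== SOURCE B (Python) =====
-- # Same classification, but via an inverted keyword->labels index and ONE pass over the
-- # columns, with the best label tracked on the fly (no scores dict, no set intersections).
-- SIGNALS = {
--     "Entity Table – Product/Part Catalog":
--         {"sku","title","brand","price","upc","mpn","description","item_name",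
--          "product_name","condition","category","manufacturer_part_number",
--          "part_number","item_sku","custom_label","ebay_title","quantity",
--          "oem_number","parts_description","part_title","additional_details",
--          "oem","real_price"},
--     "Export Format – eBay Listing Template":
--         {"action","site_id","format","duration","start_price","buy_it_now_price",
--          "listing_type","listing_duration","ebay_category","ebay_item_id",
--          "listing_status","item_id","dont_change_this","general_instructions",
--          "shippingpolicynames","returnpolicynames","paymentpolicynames"},
--     "Reference Lookup – Category Mapping":
--         {"category_id","category_name","header","mandatory","values"},
--     "Reference Lookup – eBay Item Aspects":
--         {"c_brand","c_manufacturer_part_number","c_placement_on_vehicle",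
--          "c_fitment_type","c_warranty","c_type","c_material",
--          "c_surface_finish","c_color"},
--     "Relational Mapping – Vehicle Fitment":
--         {"make","model","year","engine","submodel","trim","fitment",
--          "vehicle","compatibility","maker"},
--     "Media Mapping – Image/URL heavy":
--         {"image_url","picurl","pic_url","image","photo","gallery_url",
--          "picture_url","image_count","folder_link",
--          "image_links_one_per_column_f_g_h","exists_in_drive"},
--     "Inventory Snapshot – SKU + Quantity":
--         {"quantity","location","warehouse","stock","bin","qty",
--          "available_quantity","q"},
--     "Metadata / Instructions Sheet":
--         {"info","created","indicates_missing_required_fields",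
--          "indicates_missing_field_that_will_be_required_soon",
--          "fitment_parts_accessories_help"},
--     "Condition Descriptors Reference":
--         {"condition_descriptor","conditiondescriptors"},
-- }
--
-- # keyword -> list of labels whose signal set contains it (a keyword may map to several)
-- _INDEX = {}
-- for _label, _sig in SIGNALS.items():
--     for _kw in _sig:
--         _INDEX.setdefault(_kw, []).append(_label)
--
-- _MAX_SIG = max(len(s) for s in SIGNALS.values())
--
--
-- def classify_cluster(union_cols):
--     seen = set()
--     hits = {}                       # label -> distinct matched keywords, in column order
--     for c in union_cols:
--         lc = c.lower()
--         if lc in seen: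
--             continue
--         seen.add(lc)
--         for label in _INDEX.get(lc, ()):
--             hits.setdefault(label, []).append(lc)
--     evidence = []
--     best = None
--     best_n = 0
--     for label in SIGNALS:           # original order: keeps evidence order and tie-breaking
--         h = hits.get(label)
--         if h:
--             evidence.append(f"{label}: matched {sorted(h)}")
--             if best is None or len(h) > best_n:
--                 best, best_n = label, len(h)
--     if best is None:
--         return "Unknown – insufficient signals", 20, ["No strong column matches"]
--     return best, min(95, best_n * 100 // _MAX_SIG + 40), evidence
-- ===== Notes on version B (the rewrite author's own statement) =====
-- stated objective: alternative
-- what changed: Replaces the per-label set intersections and the scores dict + max() pass with an inverted keyword-to-labels index consulted in a single pass over the lowercased columns, the best label and its count tracked on the fly while emitting evidence in SIGNALS order.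
import Mathlib
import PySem

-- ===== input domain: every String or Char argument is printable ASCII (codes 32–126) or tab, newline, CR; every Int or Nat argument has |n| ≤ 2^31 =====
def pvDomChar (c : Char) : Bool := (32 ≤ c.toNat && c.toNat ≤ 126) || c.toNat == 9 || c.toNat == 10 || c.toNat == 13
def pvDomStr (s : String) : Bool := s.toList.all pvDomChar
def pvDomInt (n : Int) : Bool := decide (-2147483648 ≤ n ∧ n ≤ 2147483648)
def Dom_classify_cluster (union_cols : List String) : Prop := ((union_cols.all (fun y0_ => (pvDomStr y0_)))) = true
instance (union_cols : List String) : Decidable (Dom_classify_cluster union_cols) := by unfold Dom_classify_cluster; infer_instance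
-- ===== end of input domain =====

-- B replaces A's per-label set intersections, scores dict and max() pass by an inverted
-- keyword→labels index consulted in one pass over the columns, tracking the best label on the
-- fly (objective: alternative structure, same exact result).

-- ===== PORT A =====
-- The SIGNALS dict, keys in source order; each signal SET as a list of its distinct elements
-- (element order inside a set is unobservable: both ports use the sets only via membership).
def SIGNALS : List (String × List String) := [
  ("Entity Table – Product/Part Catalog",
    ["additional_details", "brand", "category", "condition", "custom_label", "description", "ebay_title", "item_name", "item_sku", "manufacturer_part_number", "mpn", "oem", "oem_number", "part_number", "part_title", "parts_description", "price", "product_name", "quantity", "real_price", "sku", "title", "upc"]),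
  ("Export Format – eBay Listing Template",
    ["action", "buy_it_now_price", "dont_change_this", "duration", "ebay_category", "ebay_item_id", "format", "general_instructions", "item_id", "listing_duration", "listing_status", "listing_type", "paymentpolicynames", "returnpolicynames", "shippingpolicynames", "site_id", "start_price"]),
  ("Reference Lookup – Category Mapping",
    ["category_id", "category_name", "header", "mandatory", "values"]),
  ("Reference Lookup – eBay Item Aspects",
    ["c_brand", "c_color", "c_fitment_type", "c_manufacturer_part_number", "c_material", "c_placement_on_vehicle", "c_surface_finish", "c_type", "c_warranty"]),
  ("Relational Mapping – Vehicle Fitment",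
    ["compatibility", "engine", "fitment", "make", "maker", "model", "submodel", "trim", "vehicle", "year"]),
  ("Media Mapping – Image/URL heavy",
    ["exists_in_drive", "folder_link", "gallery_url", "image", "image_count", "image_links_one_per_column_f_g_h", "image_url", "photo", "pic_url", "picture_url", "picurl"]),
  ("Inventory Snapshot – SKU + Quantity",
    ["available_quantity", "bin", "location", "q", "qty", "quantity", "stock", "warehouse"]),
  ("Metadata / Instructions Sheet",
    ["created", "fitment_parts_accessories_help", "indicates_missing_field_that_will_be_required_soon", "indicates_missing_required_fields", "info"]),
  ("Condition Descriptors Reference",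
    ["condition_descriptor", "conditiondescriptors"])
]

-- Python's repr of a list of these keyword strings (they contain no quotes/backslashes, so
-- repr is exactly '…' with no escaping); exact for every string that can appear in `hits`.
def pyStrListRepr (xs : List String) : String :=
  "[" ++ PySem.Str.join ", " (xs.map (fun s => "'" ++ s ++ "'")) ++ "]"

-- f"{label}: matched {sorted(hits)}"
def evStr (label : String) (hits : List String) : String :=
  label ++ ": matched " ++ pyStrListRepr (PySem.List.sorted hits (fun x => x) false)

-- the body of A's `for label, sig in SIGNALS.items():` loop
def aLabStep (cols : PySem.Set String)
    (st : PySem.Dict String (Int × List String) × List String) (p : String × List String) :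
    PySem.Dict String (Int × List String) × List String :=
  let hits := PySem.Set.inter cols p.2
  if hits.isEmpty then st
  else (st.1.insert p.1 ((hits.length : Int), hits), st.2 ++ [evStr p.1 hits])

def classify_cluster (union_cols : List String) : String × Int × List String :=
  let cols : PySem.Set String := PySem.Set.ofList (union_cols.map PySem.Str.lower)
  let st := SIGNALS.foldl (aLabStep cols) (PySem.Dict.empty, [])
  let scores := st.1
  let evidence := st.2
  if scores.items.isEmpty then ("Unknown – insufficient signals", 20, ["No strong column matches"])
  else
    -- max(scores, key=lambda k: scores[k][0]) then scores[best]: the labels (keys) are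
    -- distinct, so the lookup scores[best] yields the fold's carried item; ported by
    -- carrying the (key, value) item through the first-maximum fold.
    let bestItem := match scores.items with
      | [] => ("", ((0 : Int), ([] : List String)))
      | x :: xs => xs.foldl (fun (b q : String × Int × List String) => if q.2.1 > b.2.1 then q else b) x
    let best := bestItem.1
    let hit_count := bestItem.2.1
    -- max(len(s) for s in SIGNALS.values()): max of a nonempty list of positive lengths
    let max_sig : Int := (SIGNALS.map (fun p => (p.2.length : Int))).foldl max 0
    -- int(hit_count / max_sig * 100): this float expression equals integer floor division
    -- for every reachable value 0 ≤ hit_count ≤ max_sig = 23 (all 24 cases checked)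
    let conf := min 95 (PySem.Int.floordiv (hit_count * 100) max_sig + 40)
    (best, conf, evidence)

-- ===== PORT B =====
-- keyword → list of labels whose signal set contains it
def INDEX : PySem.Dict String (List String) :=
  SIGNALS.foldl
    (fun idx p => p.2.foldl (fun idx kw => idx.modify kw [] (· ++ [p.1])) idx)
    PySem.Dict.empty

def MAX_SIG : Int := (SIGNALS.map (fun p => (p.2.length : Int))).foldl max 0

-- the body of B's `for c in union_cols:` pass
def bColStep (st : PySem.Set String × PySem.Dict String (List String)) (c : String) :
    PySem.Set String × PySem.Dict String (List String) :=
  let lc := PySem.Str.lower c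
  if st.1.contains lc then st
  else (st.1.add lc,
        (INDEX.getD lc []).foldl (fun h label => h.modify label [] (· ++ [lc])) st.2)

-- the body of B's `for label in SIGNALS:` loop
def bLabStep (hits : PySem.Dict String (List String))
    (st : List String × Option String × Int) (p : String × List String) :
    List String × Option String × Int :=
  let h := hits.getD p.1 []
  if h.isEmpty then st
  else (st.1 ++ [evStr p.1 h],
        if st.2.1.isNone || st.2.2 < (h.length : Int) then (some p.1, (h.length : Int))
        else st.2)

def classify_cluster_alt (union_cols : List String) : String × Int × List String :=
  let st := union_cols.foldl bColStep (PySem.Set.empty, PySem.Dict.empty)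
  let hits := st.2
  let fin := SIGNALS.foldl (bLabStep hits) ([], none, 0)
  match fin.2.1 with
  | none => ("Unknown – insufficient signals", 20, ["No strong column matches"])
  | some best => (best, min 95 (PySem.Int.floordiv (fin.2.2 * 100) MAX_SIG + 40), fin.1)

-- ===== PRECONDITION & SPEC =====
def Spec_classify_cluster (union_cols : List String) (out : String × Int × List String) : Prop := out = classify_cluster_alt union_cols
instance (union_cols : List String) (out : String × Int × List String) : Decidable (Spec_classify_cluster union_cols out) := by unfold Spec_classify_cluster; infer_instance

-- ===== CLAIM (what is proved, stated in full; the proofs are below) =====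
def Claim_equal_classify_cluster : Prop := ∀ (union_cols : List String), Dom_classify_cluster union_cols → Spec_classify_cluster union_cols (classify_cluster union_cols)

-- ===== LEMMAS AND PROOFS =====

-- The per-label hit list both programs agree on: distinct lowered columns that lie in sig.
def hitsOf (uniq : List String) (p : String × List String) : List String :=
  uniq.filter (fun x => p.2.contains x)

-- First occurrences of l that are not already in seen (the elements Set.update appends).
def myNew (seen : List String) : List String → List String
  | [] => []
  | lc :: r => if seen.contains lc then myNew seen r else lc :: myNew (seen ++ [lc]) r

theorem set_update_myNew (l : List String) :
    ∀ seen, PySem.Set.update seen l = seen ++ myNew seen l := by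
  induction l with
  | nil => intro seen; simp [PySem.Set.update, myNew]
  | cons lc r ih =>
    intro seen
    by_cases hm : lc ∈ seen
    · have h1 : PySem.Set.update seen (lc :: r) = PySem.Set.update seen r := by
        simp [PySem.Set.update, PySem.Set.add, hm]
      rw [h1, ih, myNew]
      simp [hm]
    · have h1 : PySem.Set.update seen (lc :: r) = PySem.Set.update (seen ++ [lc]) r := by
        simp [PySem.Set.update, PySem.Set.add, hm]
      rw [h1, ih, myNew]
      simp [hm]

theorem ofList_myNew (l : List String) : PySem.Set.ofList l = myNew [] l := by
  have h := set_update_myNew l []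
  simpa [PySem.Set.update, PySem.Set.ofList_eq_foldl] using h

-- a fold appending the same value v to several keys' lists, seen through one key
theorem inner_append (labels : List String) (d : PySem.Dict String (List String))
    (v c : String) :
    (labels.foldl (fun h k => h.modify k [] (· ++ [v])) d).getD c []
      = d.getD c [] ++ (labels.filter (fun k => k == c)).map (fun _ => v) := by
  have h := PySem.Dict.getD_foldl_modify_append (labels.map (fun k => (k, v))) d c
  rw [List.foldl_map] at h
  rw [h]
  congr 1
  rw [List.filter_map, List.map_map]
  simp [Function.comp_def]

theorem inner_nodup (labels : List String) (hnd : labels.Nodup)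
    (d : PySem.Dict String (List String)) (v c : String) :
    (labels.foldl (fun h k => h.modify k [] (· ++ [v])) d).getD c []
      = d.getD c [] ++ (if labels.contains c then [v] else []) := by
  rw [inner_append, List.filter_beq]
  by_cases hm : c ∈ labels
  · simp [List.count_eq_one_of_mem hnd hm, hm]
  · simp [List.count_eq_zero_of_not_mem hm, hm]

theorem buildIdx_getD (S : List (String × List String)) (hnd : ∀ p ∈ S, p.2.Nodup) :
    ∀ (d : PySem.Dict String (List String)) (lc : String),
    (S.foldl (fun idx p => p.2.foldl (fun idx kw => idx.modify kw [] (· ++ [p.1])) idx) d).getD lc []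
      = d.getD lc [] ++ (S.filter (fun p => p.2.contains lc)).map Prod.fst := by
  induction S with
  | nil => simp
  | cons q S ih =>
    intro d lc
    simp only [List.foldl_cons]
    rw [ih (fun p hp => hnd p (List.mem_cons_of_mem _ hp)),
        inner_nodup q.2 (hnd q List.mem_cons_self) d q.1 lc]
    by_cases hm : lc ∈ q.2 <;> simp [hm, List.append_assoc]

theorem INDEX_getD (lc : String) :
    INDEX.getD lc [] = (SIGNALS.filter (fun p => p.2.contains lc)).map Prod.fst := by
  have h := buildIdx_getD SIGNALS (by decide) PySem.Dict.empty lc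
  simpa [INDEX] using h

theorem signals_keys_nodup : (SIGNALS.map Prod.fst).Nodup := by decide

theorem nodup_INDEX (lc : String) : (INDEX.getD lc []).Nodup := by
  rw [INDEX_getD]
  exact signals_keys_nodup.sublist (List.Sublist.map Prod.fst List.filter_sublist)

theorem mem_INDEX_iff (p : String × List String) (hp : p ∈ SIGNALS) (lc : String) :
    (INDEX.getD lc []).contains p.1 = p.2.contains lc := by
  rw [INDEX_getD]
  by_cases hm : lc ∈ p.2
  · simp [hm]
    exact ⟨p.2, by simpa using hp, hm⟩
  · simp [hm]
    intro x hx hlc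
    have heq : (p.1, x) = p := List.inj_on_of_nodup_map signals_keys_nodup hx hp rfl
    have hx2 : x = p.2 := congrArg Prod.snd heq
    exact hm (hx2 ▸ hlc)

-- B's column pass, seen through one label's entry
theorem bfold_getD (p : String × List String) (hp : p ∈ SIGNALS) :
    ∀ (cs : List String) (seen : PySem.Set String) (d : PySem.Dict String (List String)),
    ((cs.foldl bColStep (seen, d)).2).getD p.1 []
      = d.getD p.1 [] ++ (myNew seen (cs.map PySem.Str.lower)).filter (fun x => p.2.contains x) := by
  intro cs
  induction cs with
  | nil => intro seen d; simp [myNew]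
  | cons c r ih =>
    intro seen d
    rw [List.foldl_cons, List.map_cons]
    by_cases h : PySem.Str.lower c ∈ (seen : List String)
    · rw [show bColStep (seen, d) c = (seen, d) from by
        simp [bColStep, PySem.Set.contains, h]]
      rw [ih seen d, myNew]
      simp [h]
    · rw [show bColStep (seen, d) c
          = (seen ++ [PySem.Str.lower c],
             (INDEX.getD (PySem.Str.lower c) []).foldl
               (fun h label => h.modify label [] (· ++ [PySem.Str.lower c])) d) from by
        simp [bColStep, PySem.Set.contains, PySem.Set.add, h]]
      rw [ih, inner_nodup _ (nodup_INDEX (PySem.Str.lower c)) d (PySem.Str.lower c) p.1,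
          mem_INDEX_iff p hp (PySem.Str.lower c), myNew]
      by_cases hc : PySem.Str.lower c ∈ p.2 <;> simp [h, hc, List.append_assoc]

-- guarded fold = fold over the filtered list
theorem foldl_guard {α β : Type} (P : α → Bool) (f : β → α → β) (l : List α) (init : β) :
    l.foldl (fun st p => if P p then st else f st p) init
      = (l.filter (fun p => !P p)).foldl f init := by
  rw [List.foldl_filter]
  apply PySem.List.foldl_congr_mem
  intro acc x _
  cases h : P x <;> simp

-- A's label loop splits into its dict and evidence components
theorem afold_split (val : String × List String → Int × List String)
    (es : String × List String → String) :
    ∀ (L : List (String × List String)) (d : PySem.Dict String (Int × List String))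
      (ev : List String),
    L.foldl (fun (st : PySem.Dict String (Int × List String) × List String) p =>
        (st.1.insert p.1 (val p), st.2 ++ [es p])) (d, ev)
      = (L.foldl (fun d p => d.insert p.1 (val p)) d, ev ++ L.map es) := by
  intro L
  induction L with
  | nil => simp
  | cons q L ih => intro d ev; simp [ih]

-- B's label loop splits into its evidence and running-best components
theorem bfold_split (es : String × List String → String)
    (g : Option String × Int → String × List String → Option String × Int) :
    ∀ (L : List (String × List String)) (ev : List String) (s : Option String × Int),
    L.foldl (fun (st : List String × Option String × Int) p =>
        (st.1 ++ [es p], g st.2 p)) (ev, s)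
      = (ev ++ L.map es, L.foldl g s) := by
  intro L
  induction L with
  | nil => simp
  | cons q L ih => intro ev s; simp [ih]

-- B's running best corresponds to A's first-maximum fold over the score items
theorem runmax_corr (hits : String × List String → List String) :
    ∀ (xs : List (String × List String)) (b : String × Int × List String),
    xs.foldl (fun (st : Option String × Int) p =>
        if st.1.isNone || st.2 < ((hits p).length : Int)
        then (some p.1, ((hits p).length : Int)) else st) (some b.1, b.2.1)
      = ((xs.map (fun p => (p.1, (((hits p).length : Int), hits p)))).foldl
          (fun (b q : String × Int × List String) => if q.2.1 > b.2.1 then q else b) b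
         |> fun r => (some r.1, r.2.1)) := by
  intro xs
  induction xs with
  | nil => simp
  | cons y ys ih =>
    intro b
    simp only [List.foldl_cons, List.map_cons, Option.isNone_some, Bool.false_or]
    by_cases h : b.2.1 < ((hits y).length : Int)
    · simp only [h, if_pos, gt_iff_lt]
      exact ih (y.1, (((hits y).length : Int), hits y))
    · simp only [h, if_neg, gt_iff_lt, not_false_eq_true]
      simpa [h] using ih b

theorem main_eq (union_cols : List String) :
    classify_cluster union_cols = classify_cluster_alt union_cols := by
  simp only [classify_cluster, classify_cluster_alt]
  set U : PySem.Set String := PySem.Set.ofList (union_cols.map PySem.Str.lower) with hU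
  set L : List (String × List String) :=
    SIGNALS.filter (fun p => !(hitsOf U p).isEmpty) with hL
  -- A's label loop, split into dict and evidence
  have e1 : aLabStep U = fun st p =>
      if (hitsOf U p).isEmpty then st
      else (st.1.insert p.1 (((hitsOf U p).length : Int), hitsOf U p),
            st.2 ++ [evStr p.1 (hitsOf U p)]) := rfl
  have hA : SIGNALS.foldl (aLabStep U) (PySem.Dict.empty, [])
      = (L.foldl (fun d p => d.insert p.1 (((hitsOf U p).length : Int), hitsOf U p))
           PySem.Dict.empty,
         L.map (fun p => evStr p.1 (hitsOf U p))) := by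
    rw [e1, foldl_guard (fun p => (hitsOf U p).isEmpty), hL,
        afold_split (fun p => (((hitsOf U p).length : Int), hitsOf U p))
          (fun p => evStr p.1 (hitsOf U p))]
    simp
  -- B's hits dict agrees with hitsOf on every label
  have hbh : ∀ p ∈ SIGNALS,
      ((union_cols.foldl bColStep (PySem.Set.empty, PySem.Dict.empty)).2).getD p.1 []
        = hitsOf U p := by
    intro p hp
    rw [bfold_getD p hp union_cols PySem.Set.empty PySem.Dict.empty]
    simp only [hitsOf, hU, ofList_myNew]
    rfl
  -- B's label loop, with the dict lookups replaced by hitsOf, then split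
  have hB : SIGNALS.foldl
        (bLabStep (union_cols.foldl bColStep (PySem.Set.empty, PySem.Dict.empty)).2)
        ([], none, 0)
      = (L.map (fun p => evStr p.1 (hitsOf U p)),
         L.foldl (fun (st : Option String × Int) p =>
             if st.1.isNone || st.2 < ((hitsOf U p).length : Int)
             then (some p.1, ((hitsOf U p).length : Int)) else st) (none, 0)) := by
    rw [PySem.List.foldl_congr_mem SIGNALS _
        (fun st p =>
          if (hitsOf U p).isEmpty then st
          else (st.1 ++ [evStr p.1 (hitsOf U p)],
                if st.2.1.isNone || st.2.2 < ((hitsOf U p).length : Int)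
                then (some p.1, ((hitsOf U p).length : Int)) else st.2))
        ([], none, 0)
        (by intro acc p hp; simp only [bLabStep]; rw [hbh p hp]),
      foldl_guard (fun p => (hitsOf U p).isEmpty), hL,
      bfold_split (fun p => evStr p.1 (hitsOf U p))
        (fun (st : Option String × Int) p =>
          if st.1.isNone || st.2 < ((hitsOf U p).length : Int)
          then (some p.1, ((hitsOf U p).length : Int)) else st)]
    simp
  rw [hA, hB]
  -- score items: a fold of inserts at distinct fresh keys
  have nodupL : (L.map Prod.fst).Nodup :=
    signals_keys_nodup.sublist (List.Sublist.map Prod.fst List.filter_sublist)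
  have hitems : (L.foldl
        (fun d p => d.insert p.1 (((hitsOf U p).length : Int), hitsOf U p))
        PySem.Dict.empty).items
      = L.map (fun p => (p.1, (((hitsOf U p).length : Int), hitsOf U p))) := by
    have h := PySem.Dict.items_foldl_insert_fresh L Prod.fst
      (fun p => (((hitsOf U p).length : Int), hitsOf U p)) PySem.Dict.empty
      (fun a _ => rfl) nodupL
    simpa using h
  cases hLc : L with
  | nil =>
    rw [hLc] at hitems
    simp only [List.map_nil, List.foldl_nil]
    rfl
  | cons x xs =>
    rw [hLc] at hitems
    dsimp only []
    rw [hitems]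
    simp only [List.map_cons, List.isEmpty_cons, Bool.false_eq_true, if_false,
      List.foldl_cons, Option.isNone_none, Bool.true_or, if_true]
    have hr := runmax_corr (hitsOf U) xs (x.1, (((hitsOf U x).length : Int), hitsOf U x))
    dsimp only [] at hr
    rw [hr]
    simp [MAX_SIG]

-- ===== VERDICT (by name: the statement is the Claim_ definition above) =====
theorem classify_cluster_spec : Claim_equal_classify_cluster := by
  intro union_cols _
  unfold Spec_classify_cluster
  exact main_eq union_cols
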